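-- pv_equiv track=rewrite | github.com/liuhuipy/Algorithm-python | test/printTminTmax.py | PrintTminTmax
-- ===== SOURCE A (Python) =====
-- def PrintTminTmax(n, k, arr):
--     if k > n:
--         return 'error'
--     length = len(arr)
--     Tmin, Tmax = 50, -50
--     for i in range(length):
--         minTemp, maxTemp = arr[i][0], arr[i][1]
--         Mink, Maxk = 0, 0
--         for j in range(length):
--             if minTemp in range(arr[j][0], arr[j][1] + 1):
--                 Mink += 1
--             if maxTemp in range(arr[j][0], arr[j][1] + 1):
--                 Maxk += 1
--         if Mink >= k and minTemp < Tmin: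
--             Tmin = minTemp
--         if Maxk >= k and maxTemp > Tmax:
--             Tmax = maxTemp
--     if Tmin == 50 and Tmax == -50:
--         return 'error'
--     res = str(Tmin) + ' ' + str(Tmax)
--     return res
-- ===== SOURCE B (Python) =====
-- def PrintTminTmax(n, k, arr):
--     if k > n:
--         return 'error'
--     # sorted endpoint arrays of the non-empty intervals; coverage of a point t
--     # is (# starts <= t) - (# ends < t), each found by binary search.
--     starts = sorted(iv[0] for iv in arr if iv[0] <= iv[1])
--     ends = sorted(iv[1] for iv in arr if iv[0] <= iv[1])
--
--     def count_below(xs, t, strict):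
--         # number of elements of sorted xs that are < t (strict) / <= t (not strict)
--         lo, hi = 0, len(xs)
--         while lo < hi:
--             mid = (lo + hi) // 2
--             if xs[mid] < t or (not strict and xs[mid] == t):
--                 lo = mid + 1
--             else:
--                 hi = mid
--         return lo
--
--     def cov(t):
--         return count_below(starts, t, False) - count_below(ends, t, True)
--
--     tmin, tmax = 50, -50
--     for iv in arr:
--         if cov(iv[0]) >= k and iv[0] < tmin:
--             tmin = iv[0]
--         if cov(iv[1]) >= k and iv[1] > tmax:
--             tmax = iv[1]
--     if tmin == 50 and tmax == -50:
--         return 'error'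
--     return str(tmin) + ' ' + str(tmax)
-- ===== Notes on version B (the rewrite author's own statement) =====
-- stated objective: faster
-- what changed: Replaces A's O(n^2) nested all-pairs membership loop by sorting the endpoints of the non-empty intervals once and computing each candidate point's coverage with two binary searches (#starts<=t minus #ends<t).
import Mathlib
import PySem

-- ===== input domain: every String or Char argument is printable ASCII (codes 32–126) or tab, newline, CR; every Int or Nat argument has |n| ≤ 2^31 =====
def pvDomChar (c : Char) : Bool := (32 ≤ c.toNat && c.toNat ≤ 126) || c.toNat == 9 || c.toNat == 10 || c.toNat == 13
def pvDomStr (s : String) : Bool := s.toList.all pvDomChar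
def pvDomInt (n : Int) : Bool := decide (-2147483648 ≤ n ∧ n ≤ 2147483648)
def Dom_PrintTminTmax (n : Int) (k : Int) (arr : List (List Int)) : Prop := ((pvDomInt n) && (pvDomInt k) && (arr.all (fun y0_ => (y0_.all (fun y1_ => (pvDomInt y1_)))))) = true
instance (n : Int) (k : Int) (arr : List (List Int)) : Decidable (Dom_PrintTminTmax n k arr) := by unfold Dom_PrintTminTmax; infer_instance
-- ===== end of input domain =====

-- B replaces A's quadratic nested coverage scan by sorted endpoint arrays with binary-search
-- coverage counts (objective: faster, O(n log n) vs O(n^2)).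


-- ===== PORT A =====
-- body of A's inner 'for j' loop: counts intervals covering minTemp / maxTemp
def pvPairStep (minTemp maxTemp : Int) (c : Int × Int) (jv : List Int) : Int × Int :=
  (if PySem.List.pyGetD jv 0 0 ≤ minTemp ∧ minTemp ≤ PySem.List.pyGetD jv 1 0 then c.1 + 1 else c.1,
   if PySem.List.pyGetD jv 0 0 ≤ maxTemp ∧ maxTemp ≤ PySem.List.pyGetD jv 1 0 then c.2 + 1 else c.2)

-- A's inner 'for j in range(length)' loop
def pvInnerA (arr : List (List Int)) (minTemp maxTemp : Int) : Int × Int :=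
  (PySem.List.pyRange 0 (PySem.List.len arr)).foldl
    (fun c j => pvPairStep minTemp maxTemp c (PySem.List.pyGetD arr j [])) (0, 0)

-- body of A's outer 'for i' loop
def pvStepA (k : Int) (arr : List (List Int)) (tm : Int × Int) (iv : List Int) : Int × Int :=
  let minTemp := PySem.List.pyGetD iv 0 0
  let maxTemp := PySem.List.pyGetD iv 1 0
  let mk := pvInnerA arr minTemp maxTemp
  (if mk.1 ≥ k ∧ minTemp < tm.1 then minTemp else tm.1,
   if mk.2 ≥ k ∧ maxTemp > tm.2 then maxTemp else tm.2)

def PrintTminTmax (n : Int) (k : Int) (arr : List (List Int)) : String :=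
  if k > n then "error"
  else
    let st := (PySem.List.pyRange 0 (PySem.List.len arr)).foldl
      (fun tm i => pvStepA k arr tm (PySem.List.pyGetD arr i [])) (50, -50)
    if st.1 = 50 ∧ st.2 = -50 then "error"
    else PySem.Int.toStr st.1 ++ " " ++ PySem.Int.toStr st.2

-- ===== PORT B =====
-- iv[0] <= iv[1] : the interval is non-empty
def pvValid (iv : List Int) : Bool := decide (PySem.List.pyGetD iv 0 0 ≤ PySem.List.pyGetD iv 1 0)

-- sorted([iv[0] for iv in arr if iv[0] <= iv[1]]) / sorted([iv[1] ...])
def pvStartsOf (arr : List (List Int)) : List Int :=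
  PySem.List.sorted ((arr.filter pvValid).map (fun iv => PySem.List.pyGetD iv 0 0)) (fun x => x)
def pvEndsOf (arr : List (List Int)) : List Int :=
  PySem.List.sorted ((arr.filter pvValid).map (fun iv => PySem.List.pyGetD iv 1 0)) (fun x => x)

-- B's hand-written binary-search while loop 'count_below'; the loop runs at most
-- hi - lo iterations, passed as structural fuel so the kernel can evaluate it
def pvCountBelowAux (xs : List Int) (t : Int) (strict : Bool) : Nat → Nat → Nat → Nat
  | 0, lo, _ => lo
  | fuel + 1, lo, hi =>
    if lo < hi then
      let mid := (lo + hi) / 2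
      if xs.getD mid 0 < t ∨ (strict = false ∧ xs.getD mid 0 = t) then
        pvCountBelowAux xs t strict fuel (mid + 1) hi
      else
        pvCountBelowAux xs t strict fuel lo mid
    else lo

def pvCountBelow (xs : List Int) (t : Int) (strict : Bool) (lo hi : Nat) : Nat :=
  pvCountBelowAux xs t strict (hi - lo) lo hi

-- B's 'cov'
def pvCov (starts ends : List Int) (t : Int) : Int :=
  (pvCountBelow starts t false 0 starts.length : Int) - (pvCountBelow ends t true 0 ends.length : Int)

-- body of B's 'for iv in arr' loop
def pvStepB (k : Int) (starts ends : List Int) (tm : Int × Int) (iv : List Int) : Int × Int :=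
  (if pvCov starts ends (PySem.List.pyGetD iv 0 0) ≥ k ∧ PySem.List.pyGetD iv 0 0 < tm.1 then PySem.List.pyGetD iv 0 0 else tm.1,
   if pvCov starts ends (PySem.List.pyGetD iv 1 0) ≥ k ∧ PySem.List.pyGetD iv 1 0 > tm.2 then PySem.List.pyGetD iv 1 0 else tm.2)

def PrintTminTmax_alt (n : Int) (k : Int) (arr : List (List Int)) : String :=
  if k > n then "error"
  else
    let starts := pvStartsOf arr
    let ends := pvEndsOf arr
    let st := arr.foldl (pvStepB k starts ends) (50, -50)
    if st.1 = 50 ∧ st.2 = -50 then "error"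
    else PySem.Int.toStr st.1 ++ " " ++ PySem.Int.toStr st.2

-- ===== PRECONDITION & SPEC =====
-- Pre_ excludes exactly the inputs on which Python A raises IndexError: when k <= n it
-- reads arr[i][0] and arr[i][1] of every row, so every row must have length >= 2.
def Pre_PrintTminTmax (n : Int) (k : Int) (arr : List (List Int)) : Prop :=
  k > n ∨ ∀ iv ∈ arr, 2 ≤ iv.length
instance (n : Int) (k : Int) (arr : List (List Int)) : Decidable (Pre_PrintTminTmax n k arr) := by
  unfold Pre_PrintTminTmax; infer_instance

def pvWitness_PrintTminTmax : Int × Int × List (List Int) := (2, 1, [[0, 3], [2, 5]])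

def Spec_PrintTminTmax (n : Int) (k : Int) (arr : List (List Int)) (out : String) : Prop := out = PrintTminTmax_alt n k arr
instance (n : Int) (k : Int) (arr : List (List Int)) (out : String) : Decidable (Spec_PrintTminTmax n k arr out) := by unfold Spec_PrintTminTmax; infer_instance

-- ===== CLAIM (what is proved, stated in full; the proofs are below) =====
def Claim_equal_PrintTminTmax : Prop := ∀ (n : Int) (k : Int) (arr : List (List Int)), Dom_PrintTminTmax n k arr → Pre_PrintTminTmax n k arr → Spec_PrintTminTmax n k arr (PrintTminTmax n k arr)

-- ===== LEMMAS AND PROOFS =====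

-- abbreviations for the two endpoint projections
def pvG0 (iv : List Int) : Int := PySem.List.pyGetD iv 0 0
def pvG1 (iv : List Int) : Int := PySem.List.pyGetD iv 1 0

-- the binary search returns any N with the threshold property
theorem pvCB_eq_of_threshold (xs : List Int) (t : Int) (strict : Bool) (N : Nat)
    (hlo : ∀ i (h : i < xs.length), i < N → (xs[i] < t ∨ (strict = false ∧ xs[i] = t)))
    (hhi : ∀ i (h : i < xs.length), N ≤ i → ¬(xs[i] < t ∨ (strict = false ∧ xs[i] = t))) :
    ∀ m lo hi, hi - lo ≤ m → lo ≤ N → N ≤ hi → hi ≤ xs.length →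
      pvCountBelowAux xs t strict m lo hi = N := by
  intro m
  induction m with
  | zero =>
    intro lo hi h1 h2 h3 h4
    rw [pvCountBelowAux]
    omega
  | succ m ih =>
    intro lo hi h1 h2 h3 h4
    rw [pvCountBelowAux]
    by_cases hlt : lo < hi
    · rw [if_pos hlt]
      dsimp only
      have hmlt : (lo + hi) / 2 < hi := by omega
      have hmge : lo ≤ (lo + hi) / 2 := by omega
      have hmlen : (lo + hi) / 2 < xs.length := by omega
      have hg : xs.getD ((lo + hi) / 2) 0 = xs[(lo + hi) / 2] := List.getD_eq_getElem xs 0 hmlen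
      split_ifs with hc
      · have hN : (lo + hi) / 2 < N := by
          by_contra hnot
          exact hhi _ hmlen (by omega) (by rw [← hg]; exact hc)
        exact ih ((lo + hi) / 2 + 1) hi (by omega) (by omega) h3 h4
      · have hN : N ≤ (lo + hi) / 2 := by
          by_contra hnot
          exact hc (by rw [hg]; exact hlo _ hmlen (by omega))
        exact ih lo ((lo + hi) / 2) (by omega) h2 (by omega) (by omega)
    · rw [if_neg hlt]; omega

-- on a sorted list, countP of a downward-closed predicate has the threshold property
theorem pvCountP_threshold (xs : List Int) (p : Int → Bool)
    (hmono : ∀ x y : Int, x ≤ y → p y = true → p x = true)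
    (hs : xs.Pairwise (· ≤ ·)) :
    ∀ i (h : i < xs.length), (p xs[i] = true ↔ i < xs.countP p) := by
  induction xs with
  | nil => intro i h; simp at h
  | cons x l ihl =>
    rw [List.pairwise_cons] at hs
    obtain ⟨hx, hl⟩ := hs
    by_cases hpx : p x = true
    · intro i h
      cases i with
      | zero => simp [hpx]
      | succ i =>
        have hi : i < l.length := by simpa using h
        have hI := ihl hl i hi
        rw [List.getElem_cons_succ, hI]
        simp [hpx]
    · have hz : l.countP p = 0 := by
        rw [List.countP_eq_zero]
        intro y hy hpy
        exact hpx (hmono x y (hx y hy) hpy)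
      intro i h
      cases i with
      | zero => simp [hpx, hz]
      | succ i =>
        have hi : i < l.length := by simpa using h
        have hmem : l[i] ∈ l := List.getElem_mem hi
        have hni : ¬ p l[i] = true := fun hpy => hpx (hmono x _ (hx _ hmem) hpy)
        simp [hpx, hz, hni]

theorem pvCB_le (xs : List Int) (t : Int) (hs : xs.Pairwise (· ≤ ·)) :
    pvCountBelow xs t false 0 xs.length = xs.countP (fun x => decide (x ≤ t)) := by
  have hth := pvCountP_threshold xs (fun x => decide (x ≤ t)) (by intro x y hxy hy; simp_all; omega) hs
  unfold pvCountBelow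
  apply pvCB_eq_of_threshold xs t false _ _ _ (xs.length - 0) 0 xs.length (by omega)
    (by omega) List.countP_le_length le_rfl
  · intro i h hi
    have := (hth i h).mpr hi
    simp at this
    rcases lt_or_eq_of_le this with h' | h'
    · exact Or.inl h'
    · exact Or.inr ⟨rfl, h'⟩
  · intro i h hi
    have := (hth i h)
    simp at this
    intro hc
    rcases hc with h' | ⟨_, h'⟩ <;> omega

theorem pvCB_lt (xs : List Int) (t : Int) (hs : xs.Pairwise (· ≤ ·)) :
    pvCountBelow xs t true 0 xs.length = xs.countP (fun x => decide (x < t)) := by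
  have hth := pvCountP_threshold xs (fun x => decide (x < t)) (by intro x y hxy hy; simp_all; omega) hs
  unfold pvCountBelow
  apply pvCB_eq_of_threshold xs t true _ _ _ (xs.length - 0) 0 xs.length (by omega)
    (by omega) List.countP_le_length le_rfl
  · intro i h hi
    have := (hth i h).mpr hi
    simp at this
    exact Or.inl this
  · intro i h hi
    have := (hth i h)
    simp at this
    intro hc
    rcases hc with h' | ⟨h', _⟩
    · omega
    · simp at h'

-- over a list of non-empty intervals, (#starts<=t) = (#ends<t) + (#covering t)
theorem pvCount_split (l : List (List Int)) (t : Int)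
    (h : ∀ iv ∈ l, pvG0 iv ≤ pvG1 iv) :
    l.countP (fun iv => decide (pvG0 iv ≤ t)) =
      l.countP (fun iv => decide (pvG1 iv < t)) +
      l.countP (fun iv => decide (pvG0 iv ≤ t ∧ t ≤ pvG1 iv)) := by
  induction l with
  | nil => simp
  | cons iv l ih =>
    have hiv : pvG0 iv ≤ pvG1 iv := h iv List.mem_cons_self
    have hl := ih (fun jv hj => h jv (List.mem_cons_of_mem _ hj))
    simp only [List.countP_cons, hl]
    split_ifs <;> simp_all <;> omega

-- intervals with iv[0] > iv[1] cover nothing, so the filter does not change the count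
theorem pvCount_filter (arr : List (List Int)) (t : Int) :
    (arr.filter pvValid).countP (fun iv => decide (pvG0 iv ≤ t ∧ t ≤ pvG1 iv)) =
      arr.countP (fun iv => decide (pvG0 iv ≤ t ∧ t ≤ pvG1 iv)) := by
  rw [List.countP_filter]
  apply List.countP_congr
  intro iv _
  by_cases hc : pvG0 iv ≤ t ∧ t ≤ pvG1 iv
  · have : pvValid iv = true := by
      unfold pvValid; unfold pvG0 pvG1 at hc; simp; omega
    simp [hc, this]
  · simp [hc]

theorem sorted_pairwise_le (xs : List Int) :
    (PySem.List.sorted xs (fun x => x)).Pairwise (· ≤ ·) := by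
  have := PySem.List.sorted_pairwise xs (fun x => x)
  simpa using this

theorem countP_sorted (xs : List Int) (p : Int → Bool) :
    (PySem.List.sorted xs (fun x => x)).countP p = xs.countP p :=
  (PySem.List.sorted_perm xs (fun x => x) false).countP_eq p

theorem starts_count (arr : List (List Int)) (t : Int) :
    (pvStartsOf arr).countP (fun x => decide (x ≤ t)) =
      (arr.filter pvValid).countP (fun iv => decide (pvG0 iv ≤ t)) := by
  unfold pvStartsOf
  rw [countP_sorted, List.countP_map]
  rfl

theorem ends_count (arr : List (List Int)) (t : Int) :
    (pvEndsOf arr).countP (fun x => decide (x < t)) =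
      (arr.filter pvValid).countP (fun iv => decide (pvG1 iv < t)) := by
  unfold pvEndsOf
  rw [countP_sorted, List.countP_map]
  rfl

theorem pvCov_eq (arr : List (List Int)) (t : Int) :
    pvCov (pvStartsOf arr) (pvEndsOf arr) t =
      (arr.countP (fun iv => decide (pvG0 iv ≤ t ∧ t ≤ pvG1 iv)) : Int) := by
  have hps : (pvStartsOf arr).Pairwise (· ≤ ·) := by
    unfold pvStartsOf; exact sorted_pairwise_le _
  have hpe : (pvEndsOf arr).Pairwise (· ≤ ·) := by
    unfold pvEndsOf; exact sorted_pairwise_le _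
  unfold pvCov
  rw [pvCB_le _ t hps, pvCB_lt _ t hpe, starts_count, ends_count,
      pvCount_split (arr.filter pvValid) t
        (by
          intro iv hiv
          have := List.of_mem_filter hiv
          unfold pvValid at this
          unfold pvG0 pvG1
          simpa using this),
      pvCount_filter]
  push_cast
  ring


theorem foldl_pairstep (mn mx : Int) (l : List (List Int)) (a b : Int) :
    l.foldl (pvPairStep mn mx) (a, b) =
      (a + (l.countP (fun iv => decide (pvG0 iv ≤ mn ∧ mn ≤ pvG1 iv)) : Int),
       b + (l.countP (fun iv => decide (pvG0 iv ≤ mx ∧ mx ≤ pvG1 iv)) : Int)) := by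
  induction l generalizing a b with
  | nil => simp
  | cons iv l ih =>
    rw [List.foldl_cons]
    have hstep : pvPairStep mn mx (a, b) iv =
        ((if pvG0 iv ≤ mn ∧ mn ≤ pvG1 iv then a + 1 else a),
         (if pvG0 iv ≤ mx ∧ mx ≤ pvG1 iv then b + 1 else b)) := rfl
    rw [hstep, ih]
    simp only [List.countP_cons, Prod.mk.injEq, decide_eq_true_eq]
    constructor <;> (split_ifs <;> push_cast <;> omega)

-- A's inner loop as a pair of counts
theorem pvInnerA_eq (arr : List (List Int)) (mn mx : Int) :
    pvInnerA arr mn mx =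
      ((arr.countP (fun iv => decide (pvG0 iv ≤ mn ∧ mn ≤ pvG1 iv)) : Int),
       (arr.countP (fun iv => decide (pvG0 iv ≤ mx ∧ mx ≤ pvG1 iv)) : Int)) := by
  unfold pvInnerA
  rw [PySem.List.foldl_pyRange_zero_pyGetD arr [] (pvPairStep mn mx) ((0 : Int), (0 : Int)),
      foldl_pairstep]
  simp


theorem pvStep_eq (k : Int) (arr : List (List Int)) :
    pvStepA k arr = pvStepB k (pvStartsOf arr) (pvEndsOf arr) := by
  funext tm iv
  unfold pvStepA pvStepB
  dsimp only
  rw [pvInnerA_eq, pvCov_eq, pvCov_eq]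

-- ===== VERDICT (by name: the statement is the Claim_ definition above) =====
theorem PrintTminTmax_spec : Claim_equal_PrintTminTmax := by
  intro n k arr _ _
  unfold Spec_PrintTminTmax PrintTminTmax PrintTminTmax_alt
  by_cases h : k > n
  · simp [h]
  · simp only [if_neg h]
    rw [PySem.List.foldl_pyRange_zero_pyGetD arr [] (pvStepA k arr) ((50 : Int), (-50 : Int)),
        pvStep_eq k arr]
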